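-- pv_equiv track=rewrite | github.com/sriram-c/communicator-tool | src/convert_user_csv_to_facts.py | map_punc_info
-- ===== SOURCE A (Python) =====
-- def map_punc_info(chunk):
-- 	new_lst = []
-- 	lst = chunk.split('_')
-- 	for each in lst:
-- 		if '?' in each:
-- 			new_lst.append('PUNCTQUES')
-- 		else:
-- 			new_lst.append(each)
-- 	c = '_'.join(new_lst)
-- 	return c
-- ===== SOURCE B (Python) =====
-- def map_punc_info(chunk):
--     # Single left-to-right character scan: no split/join, no intermediate list
--     # of chunks; a buffer plus a "saw '?'" flag, flushed at each underscore.
--     out = []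
--     buf = []
--     seen = False
--     for ch in chunk:
--         if ch == '_':
--             out.append('PUNCTQUES' if seen else ''.join(buf))
--             out.append('_')
--             buf = []
--             seen = False
--         else:
--             buf.append(ch)
--             if ch == '?':
--                 seen = True
--     out.append('PUNCTQUES' if seen else ''.join(buf))
--     return ''.join(out)
-- ===== Notes on version B (the rewrite author's own statement) =====
-- stated objective: alternative
-- what changed: Replaces split('_') / per-chunk loop / '_'.join with a single left-to-right character scan that keeps a current-chunk buffer and a saw-'?' flag, flushing at each underscore.
import Mathlib
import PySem

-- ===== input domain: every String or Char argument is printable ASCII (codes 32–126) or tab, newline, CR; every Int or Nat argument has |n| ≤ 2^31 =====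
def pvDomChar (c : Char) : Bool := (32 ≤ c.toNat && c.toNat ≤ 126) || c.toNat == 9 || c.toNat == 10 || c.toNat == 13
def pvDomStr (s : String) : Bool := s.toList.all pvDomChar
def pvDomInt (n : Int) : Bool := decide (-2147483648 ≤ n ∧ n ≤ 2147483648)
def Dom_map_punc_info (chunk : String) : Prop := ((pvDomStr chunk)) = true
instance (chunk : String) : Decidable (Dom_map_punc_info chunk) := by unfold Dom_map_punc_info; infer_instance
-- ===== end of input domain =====

-- B replaces A's split/per-chunk-loop/join with one character scan keeping a buffer and a saw-'?' flag (alternative decomposition, same O(n) cost).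

-- ===== PORT A =====
def map_punc_info (chunk : String) : String :=
  -- lst = chunk.split('_'); sep "_" is nonempty so split? is always `some` (getD never fires)
  let lst := (PySem.Str.split? chunk "_").getD []
  let new_lst := lst.foldl (fun acc each =>
    if PySem.Str.isIn "?" each then acc ++ ["PUNCTQUES"] else acc ++ [each]) []
  PySem.Str.join "_" new_lst

-- ===== PORT B =====
-- 'PUNCTQUES' if seen else ''.join(buf)
def pvAltFlush (buf : List Char) (seen : Bool) : List Char :=
  if seen then "PUNCTQUES".toList else buf

-- the for-loop of Source B: state = (out, buf, seen)
def pvAltLoop (cs : List Char) (out buf : List Char) (seen : Bool) : List Char :=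
  match cs with
  | [] => out ++ pvAltFlush buf seen
  | c :: rest =>
    if c = '_' then pvAltLoop rest (out ++ pvAltFlush buf seen ++ ['_']) [] false
    else pvAltLoop rest out (buf ++ [c]) (seen || c = '?')

def map_punc_info_alt (chunk : String) : String :=
  String.ofList (pvAltLoop chunk.toList [] [] false)

-- ===== PRECONDITION & SPEC =====
def Spec_map_punc_info (chunk : String) (out : String) : Prop := out = map_punc_info_alt chunk
instance (chunk : String) (out : String) : Decidable (Spec_map_punc_info chunk out) := by unfold Spec_map_punc_info; infer_instance

-- ===== CLAIM (what is proved, stated in full; the proofs are below) =====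
def Claim_equal_map_punc_info : Prop := ∀ (chunk : String), Dom_map_punc_info chunk → Spec_map_punc_info chunk (map_punc_info chunk)

-- ===== LEMMAS AND PROOFS =====

-- the chunks of cs split on '_', the first one prefixed by pre (a recursive characterisation of splitOn for the singleton separator)
def pvSplit1 (pre cs : List Char) : List (List Char) :=
  match cs with
  | [] => [pre]
  | c :: rest => if c = '_' then pre :: pvSplit1 [] rest else pvSplit1 (pre ++ [c]) rest

-- what A does to one chunk
def pvF (x : List Char) : List Char :=
  if PySem.Chars.isIn ['?'] x then "PUNCTQUES".toList else x

theorem pvSplit1_ne_nil (pre cs : List Char) : pvSplit1 pre cs ≠ [] := by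
  induction cs generalizing pre with
  | nil => simp [pvSplit1]
  | cons c rest ih =>
    simp only [pvSplit1]
    split
    · simp
    · exact ih _

theorem pvGo_eq (fuel : Nat) (l cur : List Char) (acc : List (List Char)) (h : l.length ≤ fuel) :
    PySem.Chars.splitOn.go ['_'] fuel l cur acc = acc.reverse ++ pvSplit1 cur.reverse l := by
  induction fuel generalizing l cur acc with
  | zero =>
    have : l = [] := by cases l <;> simp_all
    subst this
    simp [PySem.Chars.splitOn.go, pvSplit1]
  | succ n ih =>
    cases l with
    | nil => simp [PySem.Chars.splitOn.go, pvSplit1]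
    | cons c rest =>
      simp only [PySem.Chars.splitOn.go, List.isPrefixOf]
      by_cases hc : c = '_'
      · subst hc
        simp only [beq_self_eq_true, Bool.and_self, if_pos, List.length_cons, List.drop_succ_cons,
          List.length_nil, List.drop_zero]
        rw [ih rest [] (cur.reverse :: acc) (by simpa using Nat.le_of_succ_le_succ h)]
        simp [pvSplit1]
      · have hbc : ('_' == c) = false := by simp; exact fun hh => hc hh.symm
        simp only [hbc, Bool.false_and, Bool.false_eq_true, if_false]
        rw [ih rest (c :: cur) acc (by simpa using Nat.le_of_succ_le_succ h)]
        simp [pvSplit1, hc]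

theorem pvSplitOn_eq (s : List Char) : PySem.Chars.splitOn s ['_'] = pvSplit1 [] s := by
  unfold PySem.Chars.splitOn
  rw [pvGo_eq (s.length + 1) s [] [] (Nat.le_succ _)]
  simp

-- the accumulator of pvAltLoop factors out
theorem pvAltLoop_out (cs : List Char) (out buf : List Char) (seen : Bool) :
    pvAltLoop cs out buf seen = out ++ pvAltLoop cs [] buf seen := by
  induction cs generalizing out buf seen with
  | nil => simp [pvAltLoop]
  | cons c rest ih =>
    simp only [pvAltLoop]
    split
    · rw [ih (out ++ pvAltFlush buf seen ++ ['_']), ih (([] : List Char) ++ pvAltFlush buf seen ++ ['_'])]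
      simp
    · exact ih out (buf ++ [c]) _

theorem pvFlush_eq_pvF (buf : List Char) (seen : Bool) (hseen : seen = decide ('?' ∈ buf)) :
    pvAltFlush buf seen = pvF buf := by
  have : PySem.Chars.isIn ['?'] buf = decide ('?' ∈ buf) := by
    by_cases h : '?' ∈ buf
    · simp [h, (PySem.Chars.isIn_iff_infix ['?'] buf).mpr ((List.singleton_infix_iff _ _).mpr h)]
    · simp only [h, decide_false]
      by_contra hne
      have := (PySem.Chars.isIn_iff_infix ['?'] buf).mp (by
        cases hh : PySem.Chars.isIn ['?'] buf
        · exact absurd hh hne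
        · rfl)
      exact h ((List.singleton_infix_iff _ _).mp this)
  simp [pvAltFlush, pvF, hseen, this]

-- main invariant: the scan of B computes A's join-of-mapped-chunks
theorem pvMain (cs : List Char) (buf : List Char) (seen : Bool)
    (hbuf : '_' ∉ buf) (hseen : seen = decide ('?' ∈ buf)) :
    pvAltLoop cs [] buf seen = PySem.Chars.join ['_'] ((pvSplit1 buf cs).map pvF) := by
  induction cs generalizing buf seen with
  | nil =>
    simp only [pvAltLoop, pvSplit1, List.map, List.nil_append]
    rw [PySem.Chars.join_singleton, pvFlush_eq_pvF buf seen hseen]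
  | cons c rest ih =>
    simp only [pvAltLoop, pvSplit1]
    by_cases hc : c = '_'
    · subst hc
      rw [pvAltLoop_out, pvFlush_eq_pvF buf seen hseen,
        ih [] false (by simp) (by simp)]
      obtain ⟨y, t, hyt⟩ : ∃ y t, pvSplit1 [] rest = y :: t := by
        cases h : pvSplit1 [] rest with
        | nil => exact absurd h (pvSplit1_ne_nil [] rest)
        | cons y t => exact ⟨y, t, rfl⟩
      rw [hyt]
      simp only [if_true, List.map_cons]
      rw [PySem.Chars.join_cons_cons]
      simp
    · simp only [if_neg hc]
      rw [ih (buf ++ [c]) (seen || c = '?') (by simp [hbuf, Ne.symm hc])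
        (by simp [hseen, eq_comm (a := c)])]

-- A's foldl builds exactly the map of chunks
theorem pvFold_eq_map (lst : List String) :
    lst.foldl (fun acc each =>
      if PySem.Str.isIn "?" each then acc ++ ["PUNCTQUES"] else acc ++ [each]) [] =
    lst.map (fun each => if PySem.Str.isIn "?" each then "PUNCTQUES" else each) := by
  have hf : (fun (acc : List String) each =>
      if PySem.Str.isIn "?" each then acc ++ ["PUNCTQUES"] else acc ++ [each]) =
      fun acc each => acc ++ [if PySem.Str.isIn "?" each then "PUNCTQUES" else each] := by
    funext acc e; split <;> rfl
  rw [hf, PySem.List.foldl_append_singleton_eq_map]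
  simp

theorem pvA_toList (chunk : String) :
    (map_punc_info chunk).toList =
      PySem.Chars.join ['_'] ((pvSplit1 [] chunk.toList).map pvF) := by
  unfold map_punc_info
  obtain ⟨l0, hl0, hmap⟩ : ∃ l0, PySem.Str.split? chunk "_" = some l0 ∧
      l0.map String.toList = PySem.Chars.splitOn chunk.toList ['_'] := by
    have h := PySem.Str.split?_map chunk "_"
    simp only [PySem.Chars.split?, List.isEmpty, show ("_" : String).toList = ['_'] from rfl] at h
    cases hs : PySem.Str.split? chunk "_" with
    | none => rw [hs] at h; simp at h
    | some l0 => rw [hs] at h; exact ⟨l0, rfl, by simpa using h⟩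
  rw [hl0]
  simp only [Option.getD_some]
  rw [pvFold_eq_map, PySem.Str.toList_join, List.map_map]
  have : (String.toList ∘ fun each => if PySem.Str.isIn "?" each then "PUNCTQUES" else each) =
      fun each => pvF each.toList := by
    funext e
    simp only [Function.comp, pvF, PySem.Str.isIn_eq,
      show ("?" : String).toList = ['?'] from rfl]
    split <;> rfl
  rw [this, show (fun each => pvF (String.toList each)) = pvF ∘ String.toList from rfl,
    ← List.map_map, hmap, pvSplitOn_eq, show ("_" : String).toList = ['_'] from rfl]

-- ===== VERDICT (by name: the statement is the Claim_ definition above) =====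
theorem map_punc_info_spec : Claim_equal_map_punc_info := by
  intro chunk _
  unfold Spec_map_punc_info
  apply String.toList_inj.mp
  rw [pvA_toList]
  unfold map_punc_info_alt
  rw [show (String.ofList (pvAltLoop chunk.toList [] [] false)).toList =
      pvAltLoop chunk.toList [] [] false by simp]
  rw [pvMain chunk.toList [] false (by simp) (by simp)]
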